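-- pv_equiv track=rewrite | github.com/taniksha19/NLP-Project | src/mask_reg/masker.py | _group_true
-- ===== SOURCE A (Python) =====
-- from typing import Dict, List, Tuple
--
-- def _group_true(flags: List[bool]) -> List[Tuple[int, int]]:
--     """Return spans [start, end) over token indices where flags are True."""
--     spans: List[Tuple[int, int]] = []
--     i, n = 0, len(flags)
--     while i < n:
--         if not flags[i]:
--             i += 1
--             continue
--         j = i + 1
--         while j < n and flags[j]:
--             j += 1
--         spans.append((i, j))
--         i = j
--     return spans
-- ===== SOURCE B (Python) =====
-- from typing import List, Tuple
--
-- def _group_true(flags: List[bool]) -> List[Tuple[int, int]]: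
--     """Return spans [start, end) over token indices where flags are True."""
--     n = len(flags)
--     starts = [i for i in range(n) if flags[i] and (i == 0 or not flags[i - 1])]
--     ends = [i + 1 for i in range(n) if flags[i] and (i == n - 1 or not flags[i + 1])]
--     return list(zip(starts, ends))
-- ===== Notes on version B (the rewrite author's own statement) =====
-- stated objective: alternative
-- what changed: Replaced A's stateful index walk with an inner scan-ahead loop by stateless edge detection: two comprehensions collect rising edges (starts) and falling edges (ends) independently, and zip pairs them into spans.
import Mathlib
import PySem

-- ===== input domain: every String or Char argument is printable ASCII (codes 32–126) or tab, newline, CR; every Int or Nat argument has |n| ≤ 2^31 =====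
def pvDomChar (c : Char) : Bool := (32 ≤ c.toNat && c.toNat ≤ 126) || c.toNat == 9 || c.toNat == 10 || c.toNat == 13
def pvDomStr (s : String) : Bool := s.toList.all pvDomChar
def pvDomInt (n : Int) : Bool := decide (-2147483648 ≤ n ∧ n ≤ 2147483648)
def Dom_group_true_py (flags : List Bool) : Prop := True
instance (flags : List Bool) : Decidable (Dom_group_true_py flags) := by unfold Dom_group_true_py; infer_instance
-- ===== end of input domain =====

-- B replaces A's stateful index walk (inner scan-ahead) by stateless edge detection:
-- two filtered index lists (rising/falling edges) zipped into spans (objective: alternative).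


-- ===== PORT A =====
-- inner `while j < n and flags[j]: j += 1`
def gtWhileJ (flags : List Bool) (n j : Nat) : Nat :=
  if j < n ∧ flags.getD j false then gtWhileJ flags n (j + 1) else j
termination_by n - j
decreasing_by omega

theorem gtWhileJ_ge (flags : List Bool) (n j : Nat) : j ≤ gtWhileJ flags n j := by
  unfold gtWhileJ
  split
  · exact le_trans (Nat.le_succ j) (gtWhileJ_ge flags n (j + 1))
  · exact le_rfl
termination_by n - j
decreasing_by omega

-- outer `while i < n` loop of A
def gtLoopA (flags : List Bool) (n i : Nat) (spans : List (Int × Int)) : List (Int × Int) :=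
  if h : i < n then
    if ¬ flags.getD i false then gtLoopA flags n (i + 1) spans
    else
      let j := gtWhileJ flags n (i + 1)
      gtLoopA flags n j (spans ++ [((i : Int), (j : Int))])
  else spans
termination_by n - i
decreasing_by
  · omega
  · have := gtWhileJ_ge flags n (i + 1); omega

def group_true_py (flags : List Bool) : List (Int × Int) :=
  gtLoopA flags flags.length 0 []

-- ===== PORT B =====
-- starts = [i for i in range(n) if flags[i] and (i == 0 or not flags[i-1])]
-- ends   = [i+1 for i in range(n) if flags[i] and (i == n-1 or not flags[i+1])]
-- return list(zip(starts, ends))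
def group_true_py_alt (flags : List Bool) : List (Int × Int) :=
  let n := flags.length
  let starts := ((List.range n).filter
    (fun i => flags.getD i false && (decide (i = 0) || !flags.getD (i - 1) false))).map
    (fun (i : Nat) => (i : Int))
  let ends := ((List.range n).filter
    (fun i => flags.getD i false && (decide (i = n - 1) || !flags.getD (i + 1) false))).map
    (fun i => ((i + 1 : Nat) : Int))
  starts.zip ends

-- ===== PRECONDITION & SPEC =====
def Spec_group_true_py (flags : List Bool) (out : List (Int × Int)) : Prop := out = group_true_py_alt flags
instance (flags : List Bool) (out : List (Int × Int)) : Decidable (Spec_group_true_py flags out) := by unfold Spec_group_true_py; infer_instance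

-- ===== CLAIM (what is proved, stated in full; the proofs are below) =====
def Claim_equal_group_true_py : Prop := ∀ (flags : List Bool), Dom_group_true_py flags → Spec_group_true_py flags (group_true_py flags)

-- ===== LEMMAS AND PROOFS =====

-- length of the leading run of `b`, and the remainder
def gtTakeRun (b : Bool) : List Bool → Nat × List Bool
  | [] => (0, [])
  | x :: xs =>
    if x == b then
      let p := gtTakeRun b xs
      (p.1 + 1, p.2)
    else (0, x :: xs)

theorem gtTakeRun_len (b : Bool) (l : List Bool) : (gtTakeRun b l).2.length ≤ l.length := by
  induction l with
  | nil => simp [gtTakeRun]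
  | cons x xs ih =>
    simp only [gtTakeRun]
    split
    · simpa using Nat.le_succ_of_le ih
    · simp

theorem gtWhileJ_le (flags : List Bool) (n j : Nat) (hj : j ≤ n) : gtWhileJ flags n j ≤ n := by
  unfold gtWhileJ
  split
  · rename_i h; exact gtWhileJ_le flags n (j + 1) h.1
  · exact hj
termination_by n - j
decreasing_by omega

theorem gtDropCons (flags : List Bool) (i : Nat) (h : i < flags.length) :
    flags.drop i = flags.getD i false :: flags.drop (i + 1) := by
  have h1 : flags.getD i false = flags[i] := by
    simp [List.getD_eq_getElem?_getD, List.getElem?_eq_getElem h]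
  rw [h1]
  exact (List.getElem_cons_drop h).symm

-- reference function: the spans of l, offsets starting at off
def gtSpansFrom (l : List Bool) (off : Int) : List (Int × Int) :=
  match l with
  | [] => []
  | b :: xs =>
    let p := gtTakeRun b xs
    let off' := off + ((p.1 + 1 : Nat) : Int)
    (if b then [(off, off')] else []) ++ gtSpansFrom p.2 off'
termination_by l.length
decreasing_by
  have := gtTakeRun_len b xs; simp; omega

theorem gtTakeRun_snd (b : Bool) (l : List Bool) :
    (gtTakeRun b l).2 = l.drop (gtTakeRun b l).1 := by
  induction l with
  | nil => simp [gtTakeRun]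
  | cons x xs ih =>
    simp only [gtTakeRun]
    split
    · simpa using ih
    · simp

theorem gtSpansFrom_false (xs : List Bool) (off : Int) :
    gtSpansFrom (false :: xs) off = gtSpansFrom xs (off + 1) := by
  cases xs with
  | nil => simp [gtSpansFrom, gtTakeRun]
  | cons y ys =>
    cases y with
    | false =>
      simp only [gtSpansFrom, gtTakeRun]
      simp only [BEq.rfl, if_true]
      norm_num
      congr 1
      push_cast
      omega
    | true =>
      simp [gtSpansFrom, gtTakeRun]

theorem gtWhileJ_eq (flags : List Bool) (j : Nat) (hj : j ≤ flags.length) :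
    gtWhileJ flags flags.length j = j + (gtTakeRun true (flags.drop j)).1 := by
  unfold gtWhileJ
  by_cases h : j < flags.length
  · have hd := gtDropCons flags j h
    by_cases hb : flags.getD j false
    · rw [if_pos ⟨h, hb⟩, gtWhileJ_eq flags (j + 1) (by omega), hd, hb]
      simp [gtTakeRun]
      omega
    · rw [if_neg (by tauto), hd]
      rw [show flags.getD j false = false by simpa using hb]
      simp [gtTakeRun]
  · rw [if_neg (by tauto)]
    have : flags.drop j = [] := List.drop_eq_nil_of_le (by omega)
    simp [this, gtTakeRun]
termination_by flags.length - j
decreasing_by omega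

theorem gtLoopA_eq (flags : List Bool) (i : Nat) (hi : i ≤ flags.length)
    (spans : List (Int × Int)) :
    gtLoopA flags flags.length i spans = spans ++ gtSpansFrom (flags.drop i) (i : Int) := by
  unfold gtLoopA
  by_cases h : i < flags.length
  · have hd := gtDropCons flags i h
    rw [dif_pos h]
    by_cases hb : flags.getD i false
    · rw [if_neg (by simpa using hb)]
      have hge := gtWhileJ_ge flags flags.length (i + 1)
      have hle := gtWhileJ_le flags flags.length (i + 1) (by omega)
      show gtLoopA flags flags.length (gtWhileJ flags flags.length (i + 1))
          (spans ++ [((i : Int), ((gtWhileJ flags flags.length (i + 1) : Nat) : Int))]) = _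
      rw [gtLoopA_eq flags (gtWhileJ flags flags.length (i + 1)) hle]
      rw [gtWhileJ_eq flags (i + 1) (by omega)]
      rw [hd, show flags.getD i false = true by simpa using hb]
      have hsnd := gtTakeRun_snd true (flags.drop (i + 1))
      conv_rhs => rw [gtSpansFrom]
      simp only [if_true, List.append_assoc]
      rw [List.drop_drop] at hsnd
      congr 2
      · push_cast; ring
      · rw [hsnd]
        congr 1
        push_cast
        omega
    · rw [if_pos (by simpa using hb)]
      rw [gtLoopA_eq flags (i + 1) (by omega) spans]
      rw [hd, show flags.getD i false = false by simpa using hb]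
      rw [gtSpansFrom_false]
      norm_num
  · rw [dif_neg h]
    have : flags.drop i = [] := List.drop_eq_nil_of_le (by omega)
    simp [this, gtSpansFrom]
termination_by flags.length - i
decreasing_by
  · have := gtWhileJ_ge flags flags.length (i + 1); omega
  · omega

-- rising-edge index list (prev = flag just before the current position)
def sIdx (prev : Bool) : List Bool → List Nat
  | [] => []
  | b :: xs => (if b && !prev then [0] else []) ++ (sIdx b xs).map (· + 1)

-- falling-edge index list (index of last element of each True run)
def eIdx : List Bool → List Nat
  | [] => []
  | b :: xs => (if b && !(xs.getD 0 false) then [0] else []) ++ (eIdx xs).map (· + 1)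

theorem gtZipMap {α β γ δ : Type} (f : α → γ) (g : β → δ) (l : List α) (m : List β) :
    (l.map f).zip (m.map g) = (l.zip m).map (Prod.map f g) := by
  induction l generalizing m with
  | nil => simp
  | cons a l ih => cases m <;> simp [ih]

theorem starts_filter (l : List Bool) (prev : Bool) :
    (List.range l.length).filter (fun i => l.getD i false && !((prev :: l).getD i false)) = sIdx prev l := by
  induction l generalizing prev with
  | nil => simp [sIdx]
  | cons b xs ih =>
    rw [List.length_cons, List.range_succ_eq_map, List.filter_cons, List.filter_map]
    have hc : (fun i => (b :: xs).getD i false && !((prev :: b :: xs).getD i false)) ∘ Nat.succ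
        = fun i => xs.getD i false && !((b :: xs).getD i false) := by
      funext i; simp [Function.comp]
    rw [hc, ih b]
    simp only [sIdx]
    cases b <;> cases prev <;> simp [Nat.succ_eq_add_one]
  
theorem ends_filter (l : List Bool) :
    (List.range l.length).filter (fun i => l.getD i false && !(l.getD (i + 1) false)) = eIdx l := by
  induction l with
  | nil => simp [eIdx]
  | cons b xs ih =>
    rw [List.length_cons, List.range_succ_eq_map, List.filter_cons, List.filter_map]
    have hc : (fun i => (b :: xs).getD i false && !((b :: xs).getD (i + 1) false)) ∘ Nat.succ
        = fun i => xs.getD i false && !(xs.getD (i + 1) false) := by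
      funext i; simp [Function.comp]
    rw [hc, ih]
    simp only [eIdx]
    have h1 : (b :: xs).getD 1 false = xs.getD 0 false := by simp
    rw [h1]
    cases b
    · simp
    · by_cases h0 : xs.getD 0 false <;>
        simp [h0, List.getD_eq_getElem?_getD, Nat.succ_eq_add_one] at * <;>
        simp [h0]

theorem gtTakeRun_decomp (l : List Bool) :
    List.replicate (gtTakeRun true l).1 true ++ (gtTakeRun true l).2 = l := by
  induction l with
  | nil => simp [gtTakeRun]
  | cons x xs ih =>
    simp only [gtTakeRun]
    by_cases hx : x = true
    · subst hx; simp [List.replicate_succ, ih]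
    · have : x = false := by simpa using hx
      subst this; simp

theorem gtTakeRun_head (l : List Bool) : (gtTakeRun true l).2.getD 0 false = false := by
  induction l with
  | nil => simp [gtTakeRun]
  | cons x xs ih =>
    simp only [gtTakeRun]
    by_cases hx : x = true
    · subst hx; simpa using ih
    · have : x = false := by simpa using hx
      subst this; simp

theorem sIdx_run (k : Nat) (rest : List Bool) (h : rest.getD 0 false = false) :
    sIdx true (List.replicate k true ++ rest) = (sIdx false rest).map (· + k) := by
  induction k with
  | zero =>
    cases rest with
    | nil => simp [sIdx]
    | cons r rs =>
      have : r = false := by simpa using h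
      subst this
      simp [sIdx]
  | succ k ih =>
    rw [List.replicate_succ, List.cons_append]
    simp only [sIdx]
    rw [ih, List.map_map]
    simp only [Bool.not_true, Bool.and_false, Bool.false_eq_true, if_false, List.nil_append]
    apply List.map_congr_left
    intro a _
    simp [Function.comp]
    omega

theorem eIdx_run (k : Nat) (rest : List Bool) (h : rest.getD 0 false = false) :
    eIdx (List.replicate (k + 1) true ++ rest) = k :: (eIdx rest).map (· + (k + 1)) := by
  induction k with
  | zero =>
    rw [List.replicate_succ, List.replicate_zero, List.cons_append, List.nil_append]
    simp only [eIdx]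
    rw [h]
    simp
  | succ k ih =>
    rw [List.replicate_succ, List.cons_append]
    simp only [eIdx]
    rw [ih, List.map_cons, List.map_map]
    have hhd : (List.replicate (k + 1) true ++ rest).getD 0 false = true := by
      simp [List.replicate_succ]
    rw [hhd]
    simp only [Bool.not_true, Bool.and_false, Bool.false_eq_true, if_false, List.nil_append]
    rw [List.cons_eq_cons]
    refine ⟨by omega, ?_⟩
    apply List.map_congr_left
    intro a _
    simp [Function.comp]
    omega

theorem zip_spans (l : List Bool) (off : Int) :
    ((sIdx false l).zip (eIdx l)).map (fun p => ((p.1 : Int) + off, (p.2 : Int) + off + 1))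
      = gtSpansFrom l off := by
  match l with
  | [] => simp [sIdx, eIdx, gtSpansFrom]
  | false :: xs =>
    simp only [sIdx, eIdx, Bool.false_and, Bool.false_eq_true, if_false, List.nil_append]
    rw [List.zip_map, List.map_map, gtSpansFrom_false]
    rw [← zip_spans xs (off + 1)]
    apply List.map_congr_left
    intro a _
    simp [Function.comp, Prod.map]
    constructor <;> push_cast <;> ring
  | true :: xs =>
    have hdec := gtTakeRun_decomp xs
    have hhd := gtTakeRun_head xs
    set k := (gtTakeRun true xs).1 with hk
    set rest := (gtTakeRun true xs).2 with hrest
    have hstart : sIdx false (true :: xs) = 0 :: (sIdx false rest).map (· + (k + 1)) := by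
      simp only [sIdx]
      rw [← hdec, sIdx_run k rest hhd, List.map_map]
      simp only [Bool.not_false, Bool.and_true]
      rw [if_pos trivial, List.singleton_append, List.cons_eq_cons]
      refine ⟨rfl, ?_⟩
      apply List.map_congr_left
      intro a _
      simp [Function.comp]
      omega
    have hend : eIdx (true :: xs) = k :: (eIdx rest).map (· + (k + 1)) := by
      have : true :: xs = List.replicate (k + 1) true ++ rest := by
        rw [List.replicate_succ, List.cons_append, hdec]
      rw [this]
      exact eIdx_run k rest hhd
    have hlen : rest.length < (true :: xs).length := by
      have h1 : rest.length ≤ xs.length := hrest ▸ gtTakeRun_len true xs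
      simp only [List.length_cons]
      omega
    rw [hstart, hend]
    conv_rhs => rw [gtSpansFrom]
    rw [List.zip_cons_cons, List.map_cons,
        gtZipMap (fun x : Nat => x + (k + 1)) (fun x : Nat => x + (k + 1))
          (sIdx false rest) (eIdx rest),
        List.map_map, ← zip_spans rest (off + ((k + 1 : Nat) : Int)), ← hk]
    rw [if_pos rfl, List.singleton_append, List.cons_eq_cons]
    refine ⟨?_, ?_⟩
    · simp only [Prod.mk.injEq]
      constructor <;> push_cast <;> ring
    · apply List.map_congr_left
      intro a _
      simp [Function.comp, Prod.map]
      constructor <;> push_cast <;> ring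
termination_by l.length
decreasing_by
  · simp
  · exact hlen

theorem alt_eq_spans (flags : List Bool) : group_true_py_alt flags = gtSpansFrom flags 0 := by
  unfold group_true_py_alt
  have hs : (fun i => flags.getD i false && (decide (i = 0) || !flags.getD (i - 1) false))
      = fun i => flags.getD i false && !((false :: flags).getD i false) := by
    funext i
    cases i with
    | zero => simp
    | succ j => simp
  have he : (fun i => flags.getD i false && (decide (i = flags.length - 1) || !flags.getD (i + 1) false))
      = fun i => flags.getD i false && !(flags.getD (i + 1) false) := by
    funext i
    by_cases h : i = flags.length - 1
    · subst h
      have h2 : flags[flags.length - 1 + 1]?.getD false = false := by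
        rw [List.getElem?_eq_none (by omega : flags.length ≤ flags.length - 1 + 1)]
        rfl
      simp [List.getD_eq_getElem?_getD, h2]
    · simp [h]
  simp only [hs, he, starts_filter flags false, ends_filter flags]
  rw [gtZipMap (fun i : Nat => (i : Int)) (fun i : Nat => ((i + 1 : Nat) : Int))
        (sIdx false flags) (eIdx flags),
      ← zip_spans flags 0]
  apply List.map_congr_left
  intro a _
  simp [Prod.map]

-- ===== VERDICT (by name: the statement is the Claim_ definition above) =====
theorem group_true_py_spec : Claim_equal_group_true_py := by
  intro flags _
  unfold Spec_group_true_py group_true_py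
  rw [gtLoopA_eq flags 0 (by omega) [], alt_eq_spans]
  simp
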